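-- pv_equiv track=rewrite | github.com/davidRossavik/algorithms-and-data-structures | fundamentals/dynamic-programming/knapsack.py | reconstruct_choices_unbound
-- ===== SOURCE A (Python) =====
-- def reconstruct_choices_unbound(values, weights, W, n, choices):
--     # Traverses backwards in the choices-table and finds which elements that was chosen
--     selected_items = []
--     i = n
--     capacity = W
--
--     while i > 0 and capacity > 0:
--         if choices[i][capacity] == 1:
--             selected_items.append(values[i-1]) # Append the index of the items
--             capacity -= weights[i-1] # Reduce the capacity
--             i = n # DIFFERENT: STAY IN THE SAME ELEMENT STILL
--         else:
--             i -= 1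
--
--     return selected_items[::-1] #turn around so that the order is natural
-- ===== SOURCE B (Python) =====
-- def reconstruct_choices_unbound(values, weights, W, n, choices):
--     # One pass over the table builds, for each capacity, the highest marked row
--     # (an index built once); the reconstruction walk then needs no rescanning.
--     if n <= 0 or W <= 0:
--         return []
--     best = [0] * (W + 1)
--     for i in range(1, n + 1):
--         for c in range(1, W + 1):
--             if choices[i][c] == 1:
--                 best[c] = i
--     selected_items = []
--     capacity = W
--     while capacity > 0 and best[capacity] != 0:
--         i = best[capacity]
--         selected_items.append(values[i - 1])
--         capacity -= weights[i - 1]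
--     return selected_items[::-1]
-- ===== Notes on version B (the rewrite author's own statement) =====
-- stated objective: alternative
-- what changed: Instead of A's repeated downward scan with an i=n reset per pick, B builds in one pass over the table a per-capacity index best[c] = highest marked row, so the reconstruction walk just follows best[capacity] with no rescanning.
-- outside the precondition, e.g. on reconstruct_choices_unbound([5, 7], [1, 1], 2, 2, [[0, 0, 0], [0], [1, 1, 1]]): A returns [7, 7], B raises IndexError; on reconstruct_choices_unbound([5, 7], [0, 1], 1, 2, [[0, 0], [0, 1], [0, 1]]): A returns [7], B returns [7]
import Mathlib
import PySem

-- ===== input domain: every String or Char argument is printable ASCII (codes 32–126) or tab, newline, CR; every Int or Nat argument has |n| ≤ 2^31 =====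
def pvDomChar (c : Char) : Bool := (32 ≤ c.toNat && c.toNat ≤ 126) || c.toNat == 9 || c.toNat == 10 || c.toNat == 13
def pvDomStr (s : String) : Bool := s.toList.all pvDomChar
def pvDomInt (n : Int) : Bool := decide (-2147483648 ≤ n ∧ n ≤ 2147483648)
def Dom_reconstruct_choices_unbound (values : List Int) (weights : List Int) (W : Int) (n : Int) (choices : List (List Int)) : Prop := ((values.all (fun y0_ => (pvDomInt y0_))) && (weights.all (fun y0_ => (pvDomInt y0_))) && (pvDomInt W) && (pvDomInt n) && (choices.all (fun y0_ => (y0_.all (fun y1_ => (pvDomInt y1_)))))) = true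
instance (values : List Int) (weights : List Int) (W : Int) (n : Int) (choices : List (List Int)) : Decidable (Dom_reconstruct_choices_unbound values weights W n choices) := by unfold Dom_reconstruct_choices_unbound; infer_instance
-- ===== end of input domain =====

-- B replaces A's repeated downward rescan (cursor reset to n after each pick) by a per-capacity
-- index of the highest marked row built in one pass over the table, so the reconstruction walk
-- follows the index with no rescanning: a different algorithm of the same cost.


-- ===== PORT A =====
-- choices[i][c] as Python computes it (none = IndexError; Pre_ excludes the reachable ones)
def pvCellAt (choices : List (List Int)) (i c : Int) : Option Int :=
  (PySem.List.pyGet? choices i).bind (fun row => PySem.List.pyGet? row c)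

-- A's while-loop, fuel-guarded (the fuel only makes the recursion total: on Pre_ inputs it never
-- runs out, see pvScanA_eq/pvMain_eq below; A can loop forever on a picked nonpositive weight,
-- excluded by Pre_)
def pvLoopA (values weights : List Int) (n : Int) (choices : List (List Int)) :
    Nat → Int → Int → List Int → List Int
  | 0, _, _, acc => acc
  | fuel+1, i, capacity, acc =>
    if i > 0 ∧ capacity > 0 then
      match pvCellAt choices i capacity with
      | none => acc  -- Python raises IndexError here; excluded by Pre_
      | some cell =>
        if cell = 1 then
          match PySem.List.pyGet? values (i-1), PySem.List.pyGet? weights (i-1) with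
          | some v, some w => pvLoopA values weights n choices fuel n (capacity - w) (acc ++ [v])
          | _, _ => acc  -- IndexError; excluded by Pre_
        else
          pvLoopA values weights n choices fuel (i-1) capacity acc
    else acc

def reconstruct_choices_unbound (values : List Int) (weights : List Int) (W : Int) (n : Int) (choices : List (List Int)) : List Int :=
  -- selected_items[::-1] is .reverse, exactly (PySem.List.slice?_none_none_neg_one)
  (pvLoopA values weights n choices ((n.toNat + 1) * (W.toNat + 1) + 1) n W []).reverse

-- ===== PORT B =====
-- Source B inner-loop body: 'if choices[i][c] == 1: best[c] = i' (the index c is always in range here)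
def pvMark (choices : List (List Int)) (i : Int) (b : List Int) (c : Int) : List Int :=
  match pvCellAt choices i c with
  | some cell => if cell = 1 then PySem.List.pySetD b c i else b
  | none => b  -- Python raises IndexError here; excluded by Pre_

-- Source B: best = [0]*(W+1) then the nested for-loops filling it
def pvBuild (choices : List (List Int)) (n W : Int) : List Int :=
  (PySem.List.pyRange 1 (n+1) 1).foldl
    (fun b i => (PySem.List.pyRange 1 (W+1) 1).foldl (pvMark choices i) b)
    (List.replicate (W+1).toNat 0)

-- Source B: the while-walk, fuel-guarded (fuel only totalises; capacity strictly drops on Pre_ inputs)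
def pvWalkB (values weights best : List Int) : Nat → Int → List Int → List Int
  | 0, _, out => out
  | fuel+1, capacity, out =>
    if capacity > 0 then
      match PySem.List.pyGet? best capacity with
      | some i =>
        if i ≠ 0 then
          match PySem.List.pyGet? values (i-1), PySem.List.pyGet? weights (i-1) with
          | some v, some w => pvWalkB values weights best fuel (capacity - w) (out ++ [v])
          | _, _ => out  -- IndexError; excluded by Pre_
        else out
      | none => out  -- IndexError; excluded by Pre_
    else out

def reconstruct_choices_unbound_alt (values : List Int) (weights : List Int) (W : Int) (n : Int) (choices : List (List Int)) : List Int :=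
  if n ≤ 0 ∨ W ≤ 0 then []
  else (pvWalkB values weights (pvBuild choices n W) (W.toNat + 1) W []).reverse

-- ===== PRECONDITION & SPEC =====
-- Pre_ excludes the inputs where a Python run raises IndexError (a row of the table shorter than
-- W+1, which B's one-pass precompute always reads and A may or may not reach) or where A can loop
-- forever / index out of range on a pick (a marked row whose weight is nonpositive or whose index
-- exceeds values/weights).  It is conservative for marked rows that are never actually picked,
-- and for short rows A's scan happens not to reach (examples in the claim's cites).
def Pre_reconstruct_choices_unbound (values : List Int) (weights : List Int) (W : Int) (n : Int) (choices : List (List Int)) : Prop :=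
  n ≤ 0 ∨ W ≤ 0 ∨
    ((n : Int) < (choices.length : Int) ∧
     (∀ row ∈ (choices.drop 1).take n.toNat, W < (row.length : Int)) ∧
     (∀ i ∈ List.range' 1 n.toNat,
        (∃ c ∈ List.range' 1 W.toNat, (choices.getD i []).getD c 0 = 1) →
        ((i : Int) ≤ (values.length : Int) ∧ (i : Int) ≤ (weights.length : Int) ∧
         0 < weights.getD (i-1) 0)))
instance (values : List Int) (weights : List Int) (W : Int) (n : Int) (choices : List (List Int)) : Decidable (Pre_reconstruct_choices_unbound values weights W n choices) := by unfold Pre_reconstruct_choices_unbound; infer_instance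

def pvWitness_reconstruct_choices_unbound : List Int × List Int × Int × Int × List (List Int) :=
  ([3, 4], [2, 3], 5, 2, [[0,0,0,0,0,0],[0,1,0,0,0,0],[0,0,0,1,0,1]])

def Spec_reconstruct_choices_unbound (values : List Int) (weights : List Int) (W : Int) (n : Int) (choices : List (List Int)) (out : List Int) : Prop := out = reconstruct_choices_unbound_alt values weights W n choices
instance (values : List Int) (weights : List Int) (W : Int) (n : Int) (choices : List (List Int)) (out : List Int) : Decidable (Spec_reconstruct_choices_unbound values weights W n choices out) := by unfold Spec_reconstruct_choices_unbound; infer_instance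

-- ===== CLAIM (what is proved, stated in full; the proofs are below) =====
def Claim_equal_reconstruct_choices_unbound : Prop := ∀ (values : List Int) (weights : List Int) (W : Int) (n : Int) (choices : List (List Int)), Dom_reconstruct_choices_unbound values weights W n choices → Pre_reconstruct_choices_unbound values weights W n choices → Spec_reconstruct_choices_unbound values weights W n choices (reconstruct_choices_unbound values weights W n choices)

-- ===== LEMMAS AND PROOFS =====

-- the highest j in [1, i] with choices[j][c] == 1, else 0 (reference value of both programs)
def pvBd (choices : List (List Int)) (c : Int) : Nat → Nat
  | 0 => 0
  | i+1 => if pvCellAt choices ((i+1 : Nat) : Int) c = some 1 then i+1 else pvBd choices c i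

lemma pvBd_le (choices : List (List Int)) (c : Int) (i : Nat) : pvBd choices c i ≤ i := by
  induction i with
  | zero => simp [pvBd]
  | succ k ih => simp only [pvBd]; split <;> omega

lemma pvBd_marked (choices : List (List Int)) (c : Int) (i : Nat)
    (h : pvBd choices c i ≠ 0) :
    pvCellAt choices ((pvBd choices c i : Nat) : Int) c = some 1 := by
  induction i with
  | zero => simp [pvBd] at h
  | succ k ih =>
    by_cases hx : pvCellAt choices ((k+1 : Nat) : Int) c = some 1
    · simp only [pvBd, if_pos hx]; exact hx
    · simp only [pvBd, if_neg hx] at h ⊢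
      exact ih h

-- setting one cell then reading: List.set / getD interaction
lemma pv_getD_set (l : List Int) (m c : Nat) (x : Int) :
    (l.set m x).getD c 0 = if c = m ∧ m < l.length then x else l.getD c 0 := by
  by_cases hm : m < l.length
  · by_cases hc : c = m
    · subst hc
      simp [List.getD_eq_getElem?_getD, hm]
    · rw [if_neg (by tauto)]
      simp [List.getD_eq_getElem?_getD, List.getElem?_set_ne (by omega : m ≠ c)]
  · rw [List.set_eq_of_length_le (by omega), if_neg (by tauto)]

lemma pvMark_length (choices : List (List Int)) (i : Int) (b : List Int) (c : Int) :
    (pvMark choices i b c).length = b.length := by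
  unfold pvMark
  rcases h : pvCellAt choices i c with _ | cell
  · rfl
  · by_cases hc : cell = 1
    · simp [hc, PySem.List.length_pySetD]
    · simp [hc]

-- one inner pass (row i) only changes columns 1..m where the row is marked
lemma pvRow_length (choices : List (List Int)) (i : Int) :
    ∀ (l : List Int) (b : List Int), (l.foldl (pvMark choices i) b).length = b.length := by
  intro l
  induction l with
  | nil => intro b; rfl
  | cons x xs ih => intro b; simp only [List.foldl_cons, ih, pvMark_length]

lemma pvRow_getD (choices : List (List Int)) (i : Int) :
    ∀ (m : Nat) (b : List Int) (c : Nat),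
      ((PySem.List.pyRange 1 ((m : Int)+1) 1).foldl (pvMark choices i) b).getD c 0 =
        if 1 ≤ c ∧ c ≤ m ∧ c < b.length ∧ pvCellAt choices i (c : Int) = some 1 then i
        else b.getD c 0 := by
  intro m
  induction m with
  | zero =>
    intro b c
    rw [show ((0:Nat):Int)+1 = (1:Int) from by norm_num, PySem.List.pyRange_one_eq_nil le_rfl]
    simp only [List.foldl_nil]
    rw [if_neg (by omega)]
  | succ k ih =>
    intro b c
    have hcast : ((k+1 : Nat) : Int) + 1 = (((k:Nat) : Int) + 1) + 1 := by push_cast; ring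
    rw [hcast, PySem.List.pyRange_one_succ_right (by omega : (1:Int) ≤ (k:Int)+1), List.foldl_append]
    simp only [List.foldl_cons, List.foldl_nil]
    have hlen := pvRow_length choices i (PySem.List.pyRange 1 ((k:Int)+1) 1) b
    have hceq : ((k:Int)+1) = (((k+1:Nat)) : Int) := by push_cast; ring
    rcases hcell : pvCellAt choices i ((k:Int)+1) with _ | cell
    all_goals rw [pvMark.eq_def, hcell]; dsimp only
    · -- no cell: row pass leaves b unchanged at this column
      rw [ih b c]
      have hnot1 : ¬ pvCellAt choices i (((k+1:Nat)) : Int) = some 1 := by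
        rw [← hceq, hcell]; simp
      by_cases hck : c = k+1
      · subst hck
        rw [if_neg (by omega), if_neg (by intro h; exact hnot1 h.2.2.2)]
      · by_cases h1 : 1 ≤ c ∧ c ≤ k ∧ c < b.length ∧ pvCellAt choices i (c : Int) = some 1
        · rw [if_pos h1, if_pos ⟨h1.1, by omega, h1.2.2⟩]
        · rw [if_neg h1, if_neg (by intro h; exact h1 ⟨h.1, by omega, h.2.2⟩)]
    · by_cases hc1 : cell = 1
      · subst hc1
        rw [if_pos rfl,
            PySem.List.pySetD_of_nonneg _ i (by omega : (0:Int) ≤ (k:Int)+1),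
            show ((k:Int)+1).toNat = k+1 from by omega, pv_getD_set, hlen, ih b c]
        by_cases hck : c = k+1
        · subst hck
          by_cases hblen : k+1 < b.length
          · rw [if_pos ⟨rfl, hblen⟩, if_pos ⟨by omega, by omega, hblen, by rw [← hceq]; exact hcell⟩]
          · rw [if_neg (by tauto), if_neg (by omega), if_neg (by omega)]
        · rw [if_neg (by tauto)]
          by_cases h1 : 1 ≤ c ∧ c ≤ k ∧ c < b.length ∧ pvCellAt choices i (c : Int) = some 1
          · rw [if_pos h1, if_pos ⟨h1.1, by omega, h1.2.2⟩]
          · rw [if_neg h1, if_neg (by intro h; exact h1 ⟨h.1, by omega, h.2.2⟩)]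
      · rw [if_neg hc1, ih b c]
        have hnot1 : ¬ pvCellAt choices i (((k+1:Nat)) : Int) = some 1 := by
          rw [← hceq, hcell]; simp [hc1]
        by_cases hck : c = k+1
        · subst hck
          rw [if_neg (by omega), if_neg (by intro h; exact hnot1 h.2.2.2)]
        · by_cases h1 : 1 ≤ c ∧ c ≤ k ∧ c < b.length ∧ pvCellAt choices i (c : Int) = some 1
          · rw [if_pos h1, if_pos ⟨h1.1, by omega, h1.2.2⟩]
          · rw [if_neg h1, if_neg (by intro h; exact h1 ⟨h.1, by omega, h.2.2⟩)]

-- the outer fold computes pvBd at every in-range column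
lemma pvOuter_length (choices : List (List Int)) (W : Int) :
    ∀ (l : List Int) (b : List Int),
      (l.foldl (fun b i => (PySem.List.pyRange 1 (W+1) 1).foldl (pvMark choices i) b) b).length
        = b.length := by
  intro l
  induction l with
  | nil => intro b; rfl
  | cons x xs ih => intro b; simp only [List.foldl_cons, ih, pvRow_length]

lemma pvOuter_getD (choices : List (List Int)) (W : Int) (hW : 0 ≤ W) :
    ∀ (k : Nat) (c : Nat), 1 ≤ c → c ≤ W.toNat →
      (((PySem.List.pyRange 1 ((k : Int)+1) 1).foldl
          (fun b i => (PySem.List.pyRange 1 (W+1) 1).foldl (pvMark choices i) b)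
          (List.replicate (W.toNat+1) (0:Int))).getD c 0)
        = ((pvBd choices ((c : Nat) : Int) k : Nat) : Int) := by
  intro k
  induction k with
  | zero =>
    intro c hc1 hc2
    rw [show ((0:Nat):Int)+1 = (1:Int) from by norm_num, PySem.List.pyRange_one_eq_nil le_rfl]
    simp [pvBd, List.getD]
  | succ k ih =>
    intro c hc1 hc2
    have hW1 : (W:Int)+1 = ((W.toNat : Nat):Int)+1 := by omega
    rw [hW1] at ih ⊢
    have hcast : ((k+1 : Nat) : Int) + 1 = (((k:Nat) : Int) + 1) + 1 := by push_cast; ring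
    rw [hcast, PySem.List.pyRange_one_succ_right (by omega : (1:Int) ≤ (k:Int)+1), List.foldl_append]
    simp only [List.foldl_cons, List.foldl_nil]
    rw [pvRow_getD]
    have hlenF : ((PySem.List.pyRange 1 ((k:Int)+1) 1).foldl
          (fun b i => (PySem.List.pyRange 1 (((W.toNat : Nat):Int)+1) 1).foldl (pvMark choices i) b)
          (List.replicate (W.toNat+1) (0:Int))).length = W.toNat+1 := by
      rw [pvOuter_length]; simp
    have hceq : ((k:Int)+1) = (((k+1:Nat)) : Int) := by push_cast; ring
    by_cases hmk : pvCellAt choices ((k:Int)+1) ((c:Nat) : Int) = some 1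
    · rw [if_pos ⟨hc1, hc2, by rw [hlenF]; omega, hmk⟩]
      have : pvBd choices ((c:Nat):Int) (k+1) = k+1 := by
        simp only [pvBd]; rw [if_pos (hceq ▸ hmk)]
      rw [this]; push_cast; ring
    · rw [if_neg (fun h => hmk h.2.2.2)]
      have : pvBd choices ((c:Nat):Int) (k+1) = pvBd choices ((c:Nat):Int) k := by
        simp only [pvBd]; rw [if_neg (fun h => hmk (by rw [hceq]; exact h))]
      rw [this, ih c hc1 hc2]

lemma pvBuild_get (choices : List (List Int)) (n W : Int) (hn : 0 ≤ n) (hW : 0 < W)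
    (c : Int) (hc : 0 < c) (hcW : c ≤ W) :
    PySem.List.pyGet? (pvBuild choices n W) c
      = some ((pvBd choices c n.toNat : Nat) : Int) := by
  unfold pvBuild
  rw [show n+1 = ((n.toNat : Nat):Int)+1 from by omega,
      show (W+1).toNat = W.toNat+1 from by omega]
  have hlen : ((PySem.List.pyRange 1 (((n.toNat : Nat):Int)+1) 1).foldl
      (fun b i => (PySem.List.pyRange 1 (W+1) 1).foldl (pvMark choices i) b)
      (List.replicate (W.toNat+1) (0:Int))).length = W.toNat+1 := by
    rw [pvOuter_length]; simp
  have hclen : c < (((PySem.List.pyRange 1 (((n.toNat : Nat):Int)+1) 1).foldl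
      (fun b i => (PySem.List.pyRange 1 (W+1) 1).foldl (pvMark choices i) b)
      (List.replicate (W.toNat+1) (0:Int))).length : Int) := by
    rw [hlen]; omega
  rw [PySem.List.pyGet?_eq_some_getElem _ (by omega) hclen]
  congr 1
  rw [← List.getD_eq_getElem _ 0 (by omega)]
  rw [pvOuter_getD choices W (by omega) n.toNat c.toNat (by omega) (by omega),
      show ((c.toNat : Nat) : Int) = c from by omega]

-- A's descending scan from i, with enough fuel: exit if nothing is marked, else pick pvBd
lemma pvScanA_eq (values weights : List Int) (n : Int) (choices : List (List Int)) (W : Int)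
    (hcell : ∀ (j : Nat) (c : Int), 1 ≤ j → j ≤ n.toNat → 0 < c → c ≤ W →
      ∃ x, pvCellAt choices (j : Int) c = some x)
    (hvw : ∀ (j : Nat) (c : Int), 1 ≤ j → j ≤ n.toNat → 0 < c → c ≤ W →
      pvCellAt choices (j : Int) c = some 1 →
      PySem.List.pyGet? values ((j : Int) - 1) = some (values.getD (j-1) 0) ∧
      PySem.List.pyGet? weights ((j : Int) - 1) = some (weights.getD (j-1) 0)) :
    ∀ (iN fuel : Nat) (c : Int) (acc : List Int),
      iN ≤ n.toNat → 0 < c → c ≤ W → iN + 1 ≤ fuel →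
      pvLoopA values weights n choices fuel (iN : Int) c acc =
        (if pvBd choices c iN = 0 then acc
         else pvLoopA values weights n choices (fuel - (iN + 1 - pvBd choices c iN)) n
              (c - weights.getD (pvBd choices c iN - 1) 0)
              (acc ++ [values.getD (pvBd choices c iN - 1) 0])) := by
  intro iN
  induction iN with
  | zero =>
    intro fuel c acc _ hc _ hfuel
    obtain ⟨f, rfl⟩ : ∃ f, fuel = f + 1 := ⟨fuel - 1, by omega⟩
    simp [pvLoopA, pvBd]
  | succ k ih =>
    intro fuel c acc hle hc hcW hfuel
    obtain ⟨f, rfl⟩ : ∃ f, fuel = f + 1 := ⟨fuel - 1, by omega⟩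
    have hguard : ((k+1 : Nat) : Int) > 0 ∧ c > 0 := by constructor <;> omega
    obtain ⟨x, hx⟩ := hcell (k+1) c (by omega) hle hc hcW
    have hbd : pvBd choices c (k+1)
        = if pvCellAt choices ((k+1 : Nat) : Int) c = some 1 then k+1 else pvBd choices c k := rfl
    rw [show pvLoopA values weights n choices (f+1) ((k+1 : Nat) : Int) c acc
        = if ((k+1 : Nat) : Int) > 0 ∧ c > 0 then
            match pvCellAt choices ((k+1 : Nat) : Int) c with
            | none => acc
            | some cell =>
              if cell = 1 then
                match PySem.List.pyGet? values (((k+1 : Nat) : Int)-1), PySem.List.pyGet? weights (((k+1 : Nat) : Int)-1) with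
                | some v, some w => pvLoopA values weights n choices f n (c - w) (acc ++ [v])
                | _, _ => acc
              else
                pvLoopA values weights n choices f (((k+1 : Nat) : Int)-1) c acc
          else acc from rfl]
    rw [if_pos hguard, hx]
    simp only []
    by_cases hx1 : x = 1
    · subst hx1
      obtain ⟨hv, hw⟩ := hvw (k+1) c (by omega) hle hc hcW hx
      rw [if_pos rfl, hv, hw]
      simp only []
      have hbdeq : pvBd choices c (k+1) = k+1 := by rw [hbd, if_pos hx]
      rw [hbdeq, if_neg (Nat.succ_ne_zero k)]
      rw [show f + 1 - (k + 1 + 1 - (k+1)) = f from by omega]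
    · rw [if_neg hx1, show ((k+1 : Nat) : Int) - 1 = (k : Int) from by push_cast; ring]
      rw [ih f c acc (by omega) hc hcW (by omega)]
      have hne : pvCellAt choices ((k+1 : Nat) : Int) c ≠ some 1 := by rw [hx]; simp [hx1]
      have hbdeq : pvBd choices c (k+1) = pvBd choices c k := by rw [hbd, if_neg hne]
      rw [hbdeq]
      have hkle := pvBd_le choices c k
      by_cases h0 : pvBd choices c k = 0
      · rw [if_pos h0, if_pos h0]
      · rw [if_neg h0, if_neg h0,
          show f + 1 - (k + 1 + 1 - pvBd choices c k) = f - (k + 1 - pvBd choices c k) from by omega]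

-- outer correspondence: B's walk over the precomputed table equals A's loop, round for round
lemma pvMain_eq (values weights : List Int) (n : Int) (choices : List (List Int)) (W : Int)
    (hn : 0 < n)
    (hcell : ∀ (j : Nat) (c : Int), 1 ≤ j → j ≤ n.toNat → 0 < c → c ≤ W →
      ∃ x, pvCellAt choices (j : Int) c = some x)
    (hpick : ∀ (j : Nat) (c : Int), 1 ≤ j → j ≤ n.toNat → 0 < c → c ≤ W →
      pvCellAt choices (j : Int) c = some 1 →
      PySem.List.pyGet? values ((j : Int) - 1) = some (values.getD (j-1) 0) ∧
      PySem.List.pyGet? weights ((j : Int) - 1) = some (weights.getD (j-1) 0) ∧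
      0 < weights.getD (j-1) 0)
    (hbest : ∀ (c : Int), 0 < c → c ≤ W →
      PySem.List.pyGet? (pvBuild choices n W) c
        = some ((pvBd choices c n.toNat : Nat) : Int)) :
    ∀ (cN : Nat) (c : Int) (acc : List Int) (fuelA fuelB : Nat),
      c.toNat = cN → c ≤ W → (n.toNat + 1) * (cN + 1) ≤ fuelA → cN + 1 ≤ fuelB →
      pvWalkB values weights (pvBuild choices n W) fuelB c acc =
        pvLoopA values weights n choices fuelA n c acc := by
  intro cN
  induction cN using Nat.strong_induction_on with
  | _ cN IH =>
    intro c acc fuelA fuelB hcN hcW hfA hfB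
    have hnn : ((n.toNat : Nat) : Int) = n := Int.toNat_of_nonneg hn.le
    have hfA1 : n.toNat + 1 ≤ fuelA := by
      calc n.toNat + 1 = (n.toNat + 1) * 1 := by ring
        _ ≤ (n.toNat + 1) * (cN + 1) := Nat.mul_le_mul_left _ (by omega)
        _ ≤ fuelA := hfA
    obtain ⟨fA, rfl⟩ : ∃ f, fuelA = f + 1 := ⟨fuelA - 1, by omega⟩
    obtain ⟨fB, rfl⟩ : ∃ f, fuelB = f + 1 := ⟨fuelB - 1, by omega⟩
    rw [show pvWalkB values weights (pvBuild choices n W) (fB+1) c acc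
        = if c > 0 then
            match PySem.List.pyGet? (pvBuild choices n W) c with
            | some i =>
              if i ≠ 0 then
                match PySem.List.pyGet? values (i-1), PySem.List.pyGet? weights (i-1) with
                | some v, some w => pvWalkB values weights (pvBuild choices n W) fB (c - w) (acc ++ [v])
                | _, _ => acc
              else acc
            | none => acc
          else acc from rfl]
    by_cases hc : 0 < c
    · have hscan := pvScanA_eq values weights n choices W hcell
        (fun j c h1 h2 h3 h4 h5 => ⟨(hpick j c h1 h2 h3 h4 h5).1, (hpick j c h1 h2 h3 h4 h5).2.1⟩)
        n.toNat (fA+1) c acc le_rfl hc hcW hfA1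
      rw [hnn] at hscan
      set m := pvBd choices c n.toNat with hm
      have hmle : m ≤ n.toNat := pvBd_le choices c n.toNat
      rw [if_pos hc, hbest c hc hcW]
      simp only []
      by_cases hm0 : m = 0
      · rw [hscan, if_pos (show pvBd choices c n.toNat = 0 from hm ▸ hm0),
            if_neg (show ¬ ((pvBd choices c n.toNat : Nat) : Int) ≠ 0 from by rw [← hm, hm0]; simp)]
      · have hmk : pvCellAt choices ((m : Nat) : Int) c = some 1 :=
          pvBd_marked choices c n.toNat (hm ▸ hm0)
        obtain ⟨hv, hw, hwpos⟩ := hpick m c (by omega) hmle hc hcW hmk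
        rw [if_pos (show ((pvBd choices c n.toNat : Nat) : Int) ≠ 0 from by rw [← hm]; exact_mod_cast hm0), hv, hw]
        simp only []
        rw [hscan, if_neg (show ¬ pvBd choices c n.toNat = 0 from hm ▸ hm0)]
        have hrec := IH (c - weights.getD (m-1) 0).toNat (by omega)
          (c - weights.getD (m-1) 0) (acc ++ [values.getD (m-1) 0])
          (fA + 1 - (n.toNat + 1 - m)) fB rfl (by omega) ?_ ?_
        · exact hrec
        · have h2 : (c - weights.getD (m-1) 0).toNat + 2 ≤ cN + 1 := by omega
          have heq : (n.toNat + 1) * ((c - weights.getD (m-1) 0).toNat + 1) + (n.toNat + 1)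
              = (n.toNat + 1) * ((c - weights.getD (m-1) 0).toNat + 2) := by ring
          have hle2 : (n.toNat + 1) * ((c - weights.getD (m-1) 0).toNat + 2)
              ≤ (n.toNat + 1) * (cN + 1) := Nat.mul_le_mul_left _ h2
          omega
        · omega
    · rw [if_neg hc]
      rw [show pvLoopA values weights n choices (fA+1) n c acc
          = if n > 0 ∧ c > 0 then
              match pvCellAt choices n c with
              | none => acc
              | some cell =>
                if cell = 1 then
                  match PySem.List.pyGet? values (n-1), PySem.List.pyGet? weights (n-1) with
                  | some v, some w => pvLoopA values weights n choices fA n (c - w) (acc ++ [v])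
                  | _, _ => acc
                else pvLoopA values weights n choices fA (n-1) c acc
            else acc from rfl]
      rw [if_neg (by tauto)]

lemma pvGlue (values weights : List Int) (W n : Int) (choices : List (List Int))
    (hn : 0 < n) (hW : 0 < W)
    (hpre : Pre_reconstruct_choices_unbound values weights W n choices) :
    pvLoopA values weights n choices ((n.toNat + 1) * (W.toNat + 1) + 1) n W []
      = pvWalkB values weights (pvBuild choices n W) (W.toNat + 1) W [] := by
  obtain ⟨hlen, hrow, hmarked⟩ :
      (n : Int) < (choices.length : Int) ∧
      (∀ row ∈ (choices.drop 1).take n.toNat, W < (row.length : Int)) ∧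
      (∀ i ∈ List.range' 1 n.toNat,
        (∃ c ∈ List.range' 1 W.toNat, (choices.getD i []).getD c 0 = 1) →
        ((i : Int) ≤ (values.length : Int) ∧ (i : Int) ≤ (weights.length : Int) ∧
         0 < weights.getD (i-1) 0)) := by
    rcases hpre with h | h | h
    · omega
    · omega
    · exact h
  have hlenN : n.toNat < choices.length := by omega
  have hrowlen : ∀ (j : Nat) (hj : j < choices.length), 1 ≤ j → j ≤ n.toNat →
      W < ((choices[j]'hj).length : Int) := by
    intro j hj hj1 hjn
    have h2 : j - 1 < ((choices.drop 1).take n.toNat).length := by simp; omega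
    have hmem : choices[j]'hj ∈ (choices.drop 1).take n.toNat := by
      have : ((choices.drop 1).take n.toNat)[j-1]'h2 = choices[j]'hj := by
        rw [List.getElem_take, List.getElem_drop]
        congr 1
        omega
      rw [← this]
      exact List.getElem_mem h2
    exact hrow _ hmem
  have hcell : ∀ (j : Nat) (c : Int), 1 ≤ j → j ≤ n.toNat → 0 < c → c ≤ W →
      ∃ x, pvCellAt choices (j : Int) c = some x := by
    intro j c hj1 hjn hc hcW
    have hjlen : j < choices.length := by omega
    have hr := hrowlen j hjlen hj1 hjn
    refine ⟨(choices[j]'hjlen)[c.toNat]'(by omega), ?_⟩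
    unfold pvCellAt
    rw [PySem.List.pyGet?_eq_some_getElem choices (by omega) (by exact_mod_cast by omega : (j : Int) < (choices.length : Int))]
    simp only [Option.bind_some, Int.toNat_natCast]
    exact PySem.List.pyGet?_eq_some_getElem _ (by omega) (by omega)
  have hpick : ∀ (j : Nat) (c : Int), 1 ≤ j → j ≤ n.toNat → 0 < c → c ≤ W →
      pvCellAt choices (j : Int) c = some 1 →
      PySem.List.pyGet? values ((j : Int) - 1) = some (values.getD (j-1) 0) ∧
      PySem.List.pyGet? weights ((j : Int) - 1) = some (weights.getD (j-1) 0) ∧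
      0 < weights.getD (j-1) 0 := by
    intro j c hj1 hjn hc hcW hmk
    have hjlen : j < choices.length := by omega
    have hr := hrowlen j hjlen hj1 hjn
    have hcelleq : pvCellAt choices (j : Int) c = some ((choices[j]'hjlen)[c.toNat]'(by omega)) := by
      unfold pvCellAt
      rw [PySem.List.pyGet?_eq_some_getElem choices (by omega) (by exact_mod_cast by omega : (j : Int) < (choices.length : Int))]
      simp only [Option.bind_some, Int.toNat_natCast]
      exact PySem.List.pyGet?_eq_some_getElem _ (by omega) (by omega)
    have hone : (choices[j]'hjlen)[c.toNat]'(by omega) = 1 := by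
      rw [hcelleq] at hmk
      exact Option.some.inj hmk
    obtain ⟨hjv, hjw, hwp⟩ := hmarked j
      (by rw [List.mem_range'_1]; omega)
      ⟨c.toNat, by rw [List.mem_range'_1]; omega,
       by rw [List.getD_eq_getElem choices [] hjlen,
              List.getD_eq_getElem _ 0 (by omega : c.toNat < (choices[j]'hjlen).length)]
          exact hone⟩
    refine ⟨?_, ?_, hwp⟩
    · rw [PySem.List.pyGet?_of_nonneg values (show (0:Int) ≤ (j:Int)-1 from by omega),
        show ((j : Int) - 1).toNat = j - 1 from by omega,
        List.getElem?_eq_getElem (by omega : j - 1 < values.length),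
        List.getD_eq_getElem values 0 (by omega : j - 1 < values.length)]
    · rw [PySem.List.pyGet?_of_nonneg weights (show (0:Int) ≤ (j:Int)-1 from by omega),
        show ((j : Int) - 1).toNat = j - 1 from by omega,
        List.getElem?_eq_getElem (by omega : j - 1 < weights.length),
        List.getD_eq_getElem weights 0 (by omega : j - 1 < weights.length)]
  have hbest : ∀ (c : Int), 0 < c → c ≤ W →
      PySem.List.pyGet? (pvBuild choices n W) c
        = some ((pvBd choices c n.toNat : Nat) : Int) :=
    fun c hc hcW => pvBuild_get choices n W (by omega) hW c hc hcW
  exact (pvMain_eq values weights n choices W hn hcell hpick hbest W.toNat W []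
    ((n.toNat + 1) * (W.toNat + 1) + 1) (W.toNat + 1) rfl le_rfl (by omega) le_rfl).symm

-- ===== VERDICT (by name: the statement is the Claim_ definition above) =====
theorem reconstruct_choices_unbound_spec : Claim_equal_reconstruct_choices_unbound := by
  intro values weights W n choices _ hpre
  unfold Spec_reconstruct_choices_unbound reconstruct_choices_unbound reconstruct_choices_unbound_alt
  by_cases h : n ≤ 0 ∨ W ≤ 0
  · rw [if_pos h,
      show pvLoopA values weights n choices ((n.toNat + 1) * (W.toNat + 1) + 1) n W []
        = if n > 0 ∧ W > 0 then
            match pvCellAt choices n W with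
            | none => ([] : List Int)
            | some cell =>
              if cell = 1 then
                match PySem.List.pyGet? values (n-1), PySem.List.pyGet? weights (n-1) with
                | some v, some w => pvLoopA values weights n choices ((n.toNat + 1) * (W.toNat + 1)) n (W - w) ([] ++ [v])
                | _, _ => ([] : List Int)
              else pvLoopA values weights n choices ((n.toNat + 1) * (W.toNat + 1)) (n-1) W []
          else ([] : List Int) from rfl,
      if_neg (by omega)]
    rfl
  · rw [if_neg h]
    rw [pvGlue values weights W n choices (by omega) (by omega) hpre]
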